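-- pv_equiv track=rewrite | github.com/AlenaDvo/linear_binary_bisect_search | main.py | bisect_problem
-- ===== SOURCE A (Python) =====
-- def bisect_problem(list):
--     start, end = 0, len(list) - 1
--
--     while start < end:
--         mid = (start + end) // 2
--         if is_failure(list[mid]):
--             end = mid
--         else:
--             start = mid + 1
--
--     return start
--
-- def is_failure(entry):
--     return entry.startswith("F")
-- ===== SOURCE B (Python) =====
-- def bisect_problem(list):
--     seg = list
--     offset = 0
--     while len(seg) > 1:
--         k = (len(seg) - 1) // 2
--         if is_failure(seg[k]):
--             seg = seg[:k + 1]
--         else: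
--             offset += k + 1
--             seg = seg[k + 1:]
--     return offset
--
-- def is_failure(entry):
--     return entry.startswith("F")
-- ===== Notes on version B (the rewrite author's own statement) =====
-- stated objective: alternative
-- what changed: Instead of A's index-pair while-loop over the whole list, B maintains a shrinking sublist plus an offset accumulator, slicing the segment in half each step; the midpoint arithmetic is mirrored so the result is identical.
import Mathlib
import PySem

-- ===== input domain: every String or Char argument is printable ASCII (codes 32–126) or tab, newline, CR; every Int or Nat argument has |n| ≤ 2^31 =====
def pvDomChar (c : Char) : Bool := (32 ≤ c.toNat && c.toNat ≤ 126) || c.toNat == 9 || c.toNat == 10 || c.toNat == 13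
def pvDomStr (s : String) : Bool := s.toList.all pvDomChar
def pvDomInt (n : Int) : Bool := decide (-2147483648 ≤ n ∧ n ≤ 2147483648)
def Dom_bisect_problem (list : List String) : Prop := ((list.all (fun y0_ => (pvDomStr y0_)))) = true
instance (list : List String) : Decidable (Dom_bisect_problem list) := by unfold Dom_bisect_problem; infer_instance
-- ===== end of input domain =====

-- B replaces A's index-pair binary-search loop by a loop over a shrinking sublist with an offset accumulator (alternative decomposition; same result, slicing costs O(n)).


-- ===== PORT A =====
def is_failure (entry : String) : Bool := PySem.Str.startswith entry "F"

-- the while-loop of A, state (start, end); list[mid] is always in range when the loop runs,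
-- so the .getD "" default is never used
def bisectLoop (list : List String) (start e : Int) : Int :=
  if h : start < e then
    let mid := PySem.Int.floordiv (start + e) 2
    if is_failure ((PySem.List.pyGet? list mid).getD "") then
      bisectLoop list start mid
    else
      bisectLoop list (mid + 1) e
  else
    start
termination_by (e - start).toNat
decreasing_by
  · have h2 : PySem.Int.floordiv (start + e) 2 < e :=
      (PySem.Int.floordiv_lt_iff_lt_mul (by omega)).mpr (by omega)
    have h1 := PySem.Int.floordiv_two_mid_bounds (le_of_lt h)
    omega
  · have h1 := PySem.Int.floordiv_two_mid_bounds (le_of_lt h)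
    omega

def bisect_problem (list : List String) : Int :=
  bisectLoop list 0 ((list.length : Int) - 1)

-- ===== PORT B =====
def is_failure_b (entry : String) : Bool := PySem.Str.startswith entry "F"

-- the while-loop of B, state (seg, offset); k < seg.length always holds when the loop
-- runs, so the .getD "" default is never used; seg[:k+1] / seg[k+1:] are List.take/drop
-- (exact for these nonnegative in-range slice bounds)
def bisectSegLoop (seg : List String) (offset : Int) : Int :=
  if h : 1 < seg.length then
    let k := (seg.length - 1) / 2
    if is_failure_b (seg.getD k "") then
      bisectSegLoop (seg.take (k + 1)) offset
    else
      bisectSegLoop (seg.drop (k + 1)) (offset + ((k : Int) + 1))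
  else
    offset
termination_by seg.length
decreasing_by
  · simp only [List.length_take]; omega
  · simp only [List.length_drop]; omega

def bisect_problem_alt (list : List String) : Int :=
  bisectSegLoop list 0

-- ===== PRECONDITION & SPEC =====
def Spec_bisect_problem (list : List String) (out : Int) : Prop := out = bisect_problem_alt list
instance (list : List String) (out : Int) : Decidable (Spec_bisect_problem list out) := by unfold Spec_bisect_problem; infer_instance

-- ===== CLAIM (what is proved, stated in full; the proofs are below) =====
def Claim_equal_bisect_problem : Prop := ∀ (list : List String), Dom_bisect_problem list → Spec_bisect_problem list (bisect_problem list)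

-- ===== LEMMAS AND PROOFS =====
theorem bisectLoop_eq_seg (list : List String) :
    ∀ (n : Nat) (s e : Int), (e - s).toNat = n → 0 ≤ s → e < (list.length : Int) → s ≤ e + 1 →
      bisectLoop list s e = bisectSegLoop ((list.drop s.toNat).take (e + 1 - s).toNat) s := by
  intro n
  induction n using Nat.strong_induction_on with
  | _ n ih =>
    intro s e hn hs he hse
    by_cases hlt : s < e
    · -- loop body runs on both sides
      have hlen : ((list.drop s.toNat).take (e + 1 - s).toNat).length = (e + 1 - s).toNat := by
        simp only [List.length_take, List.length_drop]; omega
      set seg := (list.drop s.toNat).take (e + 1 - s).toNat with hseg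
      have hL : 1 < seg.length := by rw [hlen]; omega
      -- the midpoint
      have hmid : PySem.Int.floordiv (s + e) 2 = s + ((seg.length - 1) / 2 : Nat) := by
        rw [PySem.Int.floordiv_eq_ediv_of_pos (by omega)]
        rw [hlen]
        omega
      set k : Nat := (seg.length - 1) / 2 with hk
      have hkN : k < seg.length := by omega
      -- the two branch conditions agree
      have hget : (PySem.List.pyGet? list (s + (k : Int))).getD "" = seg.getD k "" := by
        rw [PySem.List.pyGet?_of_nonneg list (by omega)]
        rw [hseg, List.getD_eq_getElem?_getD,
            List.getElem?_take_of_lt (by omega : k < (e + 1 - s).toNat), List.getElem?_drop]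
        rw [show (s + (k : Int)).toNat = s.toNat + k from by omega]
      rw [bisectLoop, dif_pos hlt, bisectSegLoop, dif_pos hL]
      simp only [hmid, ← hk, hget]
      by_cases hf : is_failure (seg.getD k "") = true
      · have hf' : is_failure_b (seg.getD k "") = true := hf
        rw [if_pos hf, if_pos hf']
        have := ih ((s + (k : Int)) - s).toNat (by omega)
          s (s + (k : Int)) rfl hs (by omega) (by omega)
        rw [this]
        congr 1
        rw [hseg, List.take_take]
        congr 1
        omega
      · have hf' : ¬ is_failure_b (seg.getD k "") = true := hf
        rw [if_neg hf, if_neg hf']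
        have := ih (e - (s + (k : Int) + 1)).toNat (by omega)
          (s + (k : Int) + 1) e rfl (by omega) he (by omega)
        rw [this]
        have hdrop : seg.drop (k + 1) =
            (list.drop (s + (k : Int) + 1).toNat).take (e + 1 - (s + (k : Int) + 1)).toNat := by
          rw [hseg, List.drop_take, List.drop_drop]
          congr 1
          · omega
          · congr 1; omega
        rw [hdrop]
        congr 1
        omega
    · -- both loops stop immediately
      rw [bisectLoop, dif_neg hlt, bisectSegLoop, dif_neg]
      simp only [List.length_take, List.length_drop]
      omega

-- ===== VERDICT (by name: the statement is the Claim_ definition above) =====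
theorem bisect_problem_spec : Claim_equal_bisect_problem := by
  intro list _
  unfold Spec_bisect_problem bisect_problem bisect_problem_alt
  rcases list with _ | ⟨x, xs⟩
  · rw [bisectLoop, bisectSegLoop]
    simp
  · have h := bisectLoop_eq_seg (x :: xs) ((((x :: xs).length : Int) - 1) - 0).toNat 0
      (((x :: xs).length : Int) - 1) rfl (by omega) (by omega) (by simp; omega)
    rw [h]
    congr 1
    simp only [Int.toNat_zero, List.drop_zero]
    rw [List.take_of_length_le (by simp)]
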